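-- pv_equiv track=rewrite | github.com/gbordes77/Manalytics | backup_before_reboot_20250722_112400/python/classifier/advanced_archetype_classifier.py | _detect_colors_from_cards
-- ===== SOURCE A (Python) =====
-- from typing import Dict, List, Optional, Set, Tuple
--
-- def _detect_colors_from_cards(cards: List[str]) -> str:
--     """
--     Detect color identity from card names
--     Simplified version for MTG color detection
--     """
--     # This is a simplified color detection
--     # In a real implementation, you'd use a card database
--     color_indicators = {
--         "W": ["Plains", "White", "Azorius", "Orzhov", "Boros", "Selesnya"],
--         "U": ["Island", "Blue", "Azorius", "Dimir", "Izzet", "Simic"],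
--         "B": ["Swamp", "Black", "Dimir", "Rakdos", "Orzhov", "Golgari"],
--         "R": ["Mountain", "Red", "Rakdos", "Izzet", "Boros", "Gruul"],
--         "G": ["Forest", "Green", "Gruul", "Golgari", "Simic", "Selesnya"],
--     }
--
--     detected_colors = set()
--
--     for card in cards:
--         card_name = str(card).lower()
--         for color, indicators in color_indicators.items():
--             if any(indicator.lower() in card_name for indicator in indicators):
--                 detected_colors.add(color)
--
--     # Return sorted colors
--     return "".join(sorted(detected_colors))
-- ===== SOURCE B (Python) =====
-- def _detect_colors_from_cards(cards):
--     """
--     Detect color identity from card names.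
--     One combined lowercase blob is built from all card names (newline-separated,
--     and no indicator contains a newline), then each color is tested once
--     against the blob instead of re-scanning the indicator table per card.
--     """
--     color_indicators = {
--         "W": ["Plains", "White", "Azorius", "Orzhov", "Boros", "Selesnya"],
--         "U": ["Island", "Blue", "Azorius", "Dimir", "Izzet", "Simic"],
--         "B": ["Swamp", "Black", "Dimir", "Rakdos", "Orzhov", "Golgari"],
--         "R": ["Mountain", "Red", "Rakdos", "Izzet", "Boros", "Gruul"],
--         "G": ["Forest", "Green", "Gruul", "Golgari", "Simic", "Selesnya"],
--     }
--     blob = "\n".join(str(card).lower() for card in cards)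
--     return "".join(
--         color
--         for color in sorted(color_indicators)
--         if any(indicator.lower() in blob for indicator in color_indicators[color])
--     )
-- ===== Notes on version B (the rewrite author's own statement) =====
-- stated objective: faster
-- what changed: B concatenates all lowercased card names once into a newline-separated blob and then makes a single pass over the 5-color indicator table testing each indicator against the blob (emitting colors directly in sorted key order), instead of A's per-card scan of the whole table with a set accumulator.
import Mathlib
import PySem

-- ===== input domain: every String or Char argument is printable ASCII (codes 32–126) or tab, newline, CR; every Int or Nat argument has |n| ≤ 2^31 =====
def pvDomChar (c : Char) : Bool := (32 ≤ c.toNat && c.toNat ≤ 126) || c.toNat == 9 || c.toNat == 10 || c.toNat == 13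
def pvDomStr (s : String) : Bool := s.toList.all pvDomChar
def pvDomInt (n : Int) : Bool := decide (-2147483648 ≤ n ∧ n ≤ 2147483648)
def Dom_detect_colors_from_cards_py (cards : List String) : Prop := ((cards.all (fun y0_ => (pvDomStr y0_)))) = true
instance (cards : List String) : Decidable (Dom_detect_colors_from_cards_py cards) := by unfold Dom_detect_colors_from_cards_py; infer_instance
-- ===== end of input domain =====

-- B builds one newline-joined lowercase blob of all card names and scans the indicator
-- table once against it (emitting colors in sorted key order), instead of A's per-card
-- table scan into a set; objective: faster by a constant factor (fewer substring scans).

-- the color_indicators dict literal, shared verbatim by both sources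
def pvColorIndicators : PySem.Dict String (List String) := PySem.Dict.ofList [
  ("W", ["Plains", "White", "Azorius", "Orzhov", "Boros", "Selesnya"]),
  ("U", ["Island", "Blue", "Azorius", "Dimir", "Izzet", "Simic"]),
  ("B", ["Swamp", "Black", "Dimir", "Rakdos", "Orzhov", "Golgari"]),
  ("R", ["Mountain", "Red", "Rakdos", "Izzet", "Boros", "Gruul"]),
  ("G", ["Forest", "Green", "Gruul", "Golgari", "Simic", "Selesnya"])]

-- ===== PORT A =====
-- str(card) on a str is the identity, so card_name = lower card
def detect_colors_from_cards_py (cards : List String) : String :=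
  let detected : PySem.Set String :=
    cards.foldl (fun det card =>
      let card_name := PySem.Str.lower card
      (PySem.Dict.items pvColorIndicators).foldl (fun det ci =>
        if ci.2.any (fun indicator => PySem.Str.isIn (PySem.Str.lower indicator) card_name)
        then PySem.Set.add det ci.1 else det) det)
      PySem.Set.empty
  PySem.Str.join "" (PySem.List.sorted detected (fun x => x) false)

-- ===== PORT B =====
def detect_colors_from_cards_py_alt (cards : List String) : String :=
  let blob := PySem.Str.join "\n" (cards.map (fun card => PySem.Str.lower card))
  PySem.Str.join ""
    ((PySem.List.sorted (PySem.Dict.keys pvColorIndicators) (fun x => x) false).filter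
      (fun color => (PySem.Dict.getD pvColorIndicators color []).any
        (fun indicator => PySem.Str.isIn (PySem.Str.lower indicator) blob)))

-- ===== PRECONDITION & SPEC =====
def Spec_detect_colors_from_cards_py (cards : List String) (out : String) : Prop := out = detect_colors_from_cards_py_alt cards
instance (cards : List String) (out : String) : Decidable (Spec_detect_colors_from_cards_py cards out) := by unfold Spec_detect_colors_from_cards_py; infer_instance

-- ===== CLAIM (what is proved, stated in full; the proofs are below) =====
def Claim_equal_detect_colors_from_cards_py : Prop := ∀ (cards : List String), Dom_detect_colors_from_cards_py cards → Spec_detect_colors_from_cards_py cards (detect_colors_from_cards_py cards)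

-- ===== LEMMAS AND PROOFS =====

-- a prefix of xs ++ c :: ys not containing c is a prefix of xs
theorem pv_prefix_split {α : Type} (c : α) (pat xs ys : List α)
    (hc : c ∉ pat) (h : pat <+: xs ++ c :: ys) : pat <+: xs := by
  induction xs generalizing pat with
  | nil =>
    cases pat with
    | nil => exact List.nil_prefix
    | cons a p =>
      rw [List.nil_append, List.cons_prefix_cons] at h
      exact absurd (h.1 ▸ List.mem_cons_self) hc
  | cons x xs ih =>
    cases pat with
    | nil => exact List.nil_prefix
    | cons a p =>
      rw [List.cons_append, List.cons_prefix_cons] at h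
      exact List.cons_prefix_cons.2 ⟨h.1, ih p (fun hm => hc (List.mem_cons_of_mem _ hm)) h.2⟩

-- an infix of xs ++ c :: ys not containing c lies in xs or in ys
theorem pv_infix_split {α : Type} (c : α) (pat ys : List α) (hc : c ∉ pat) :
    ∀ xs, (pat <:+: xs ++ c :: ys ↔ pat <:+: xs ∨ pat <:+: ys) := by
  intro xs
  constructor
  · induction xs with
    | nil =>
      intro h
      rcases List.infix_cons_iff.1 (by simpa using h) with hp | h'
      · have : pat <+: ([] : List α) := pv_prefix_split c pat [] ys hc (by simpa using hp)
        exact Or.inl this.isInfix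
      · exact Or.inr h'
    | cons x xs ih =>
      intro h
      rcases List.infix_cons_iff.1 (by simpa using h) with hp | h'
      · exact Or.inl (pv_prefix_split c pat (x :: xs) ys hc (by simpa using hp)).isInfix
      · rcases ih h' with h1 | h2
        · exact Or.inl (List.infix_cons h1)
        · exact Or.inr h2
  · rintro (h | h)
    · rcases h with ⟨s, t, rfl⟩
      exact ⟨s, t ++ c :: ys, by simp⟩
    · rcases h with ⟨s, t, rfl⟩
      exact ⟨xs ++ c :: s, t, by simp⟩

-- a nonempty pattern without the separator char is an infix of the joined blob
-- iff it is an infix of one of the parts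
theorem pv_infix_join (c : Char) (pat : List Char) (hne : pat ≠ []) (hc : c ∉ pat) :
    ∀ parts : List (List Char),
      (pat <:+: PySem.Chars.join [c] parts ↔ ∃ p ∈ parts, pat <:+: p) := by
  intro parts
  induction parts with
  | nil => simp [PySem.Chars.join_nil, hne]
  | cons p parts ih =>
    cases parts with
    | nil => simp [PySem.Chars.join_singleton]
    | cons q rest =>
      rw [PySem.Chars.join_cons_cons, List.append_assoc, List.singleton_append,
          pv_infix_split c pat _ hc, ih]
      simp

-- ind in blob ↔ ind in some lowered card  (string level)
theorem pv_isIn_blob (cards : List String) (ind : String)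
    (h1 : ind.toList ≠ []) (h2 : '\n' ∉ ind.toList) :
    (PySem.Str.isIn ind (PySem.Str.join "\n" (cards.map (fun card => PySem.Str.lower card))) = true)
      ↔ ∃ card ∈ cards, PySem.Str.isIn ind (PySem.Str.lower card) = true := by
  rw [PySem.Str.isIn_eq, PySem.Chars.isIn_iff_infix, PySem.Str.toList_join,
      show "\n".toList = ['\n'] from rfl, pv_infix_join '\n' ind.toList h1 h2]
  simp [PySem.Str.isIn_eq, PySem.Chars.isIn_iff_infix]

-- any indicator of a row in the blob ↔ some card hit by the row
theorem pv_any_blob (cards : List String) (inds : List String)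
    (h : ∀ ind ∈ inds, (PySem.Str.lower ind).toList ≠ [] ∧ '\n' ∉ (PySem.Str.lower ind).toList) :
    ((inds.any (fun ind => PySem.Str.isIn (PySem.Str.lower ind)
        (PySem.Str.join "\n" (cards.map (fun card => PySem.Str.lower card))))) = true)
      ↔ ∃ card ∈ cards, (inds.any (fun ind =>
          PySem.Str.isIn (PySem.Str.lower ind) (PySem.Str.lower card))) = true := by
  simp only [List.any_eq_true]
  constructor
  · rintro ⟨ind, hi, hin⟩
    obtain ⟨card, hcard, h'⟩ := (pv_isIn_blob cards _ (h ind hi).1 (h ind hi).2).1 hin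
    exact ⟨card, hcard, ind, hi, h'⟩
  · rintro ⟨card, hcard, ind, hi, h'⟩
    exact ⟨ind, hi, (pv_isIn_blob cards _ (h ind hi).1 (h ind hi).2).2 ⟨card, hcard, h'⟩⟩

-- membership of the inner fold (one card against the table)
theorem pv_mem_foldl_add_if {α : Type} (l : List (String × α)) (P : String × α → Bool)
    (s : PySem.Set String) (x : String) :
    (x ∈ l.foldl (fun s ci => if P ci then PySem.Set.add s ci.1 else s) s)
      ↔ x ∈ s ∨ ∃ ci ∈ l, P ci = true ∧ x = ci.1 := by
  induction l generalizing s with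
  | nil => simp
  | cons a l ih =>
    rw [List.foldl_cons]
    by_cases hP : P a = true
    · simp [hP, ih, PySem.Set.mem_add]; tauto
    · rw [if_neg hP, ih]
      constructor
      · rintro (h | ⟨ci, hci, h1, h2⟩)
        · exact Or.inl h
        · exact Or.inr ⟨ci, List.mem_cons_of_mem _ hci, h1, h2⟩
      · rintro (h | ⟨ci, hci, h1, h2⟩)
        · exact Or.inl h
        · rcases List.mem_cons.1 hci with rfl | hci'
          · exact absurd h1 hP
          · exact Or.inr ⟨ci, hci', h1, h2⟩

theorem pv_nodup_foldl_add_if {α : Type} (l : List (String × α)) (P : String × α → Bool)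
    (s : PySem.Set String) (hs : s.Nodup) :
    (l.foldl (fun s ci => if P ci then PySem.Set.add s ci.1 else s) s).Nodup := by
  induction l generalizing s with
  | nil => exact hs
  | cons a l ih =>
    rw [List.foldl_cons]
    by_cases hP : P a = true
    · simp only [hP, if_true]; exact ih _ (PySem.Set.nodup_add _ _ hs)
    · simp only [hP]; exact ih _ hs

-- membership of A's detected set
theorem pv_mem_detected (cards : List String) (s : PySem.Set String) (x : String) :
    (x ∈ cards.foldl (fun det card =>
        (PySem.Dict.items pvColorIndicators).foldl (fun det ci =>
          if ci.2.any (fun indicator => PySem.Str.isIn (PySem.Str.lower indicator) (PySem.Str.lower card))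
          then PySem.Set.add det ci.1 else det) det) s)
      ↔ x ∈ s ∨ ∃ card ∈ cards, ∃ ci ∈ PySem.Dict.items pvColorIndicators,
          (ci.2.any (fun indicator => PySem.Str.isIn (PySem.Str.lower indicator) (PySem.Str.lower card))) = true
          ∧ x = ci.1 := by
  induction cards generalizing s with
  | nil => simp
  | cons card cards ih =>
    rw [List.foldl_cons, ih, pv_mem_foldl_add_if]
    constructor
    · rintro ((h | ⟨ci, hci, h1, h2⟩) | ⟨card', hc', hrest⟩)
      · exact Or.inl h
      · exact Or.inr ⟨card, List.mem_cons_self, ci, hci, h1, h2⟩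
      · exact Or.inr ⟨card', List.mem_cons_of_mem _ hc', hrest⟩
    · rintro (h | ⟨card', hc', hrest⟩)
      · exact Or.inl (Or.inl h)
      · rcases List.mem_cons.1 hc' with rfl | hc''
        · exact Or.inl (Or.inr hrest)
        · exact Or.inr ⟨card', hc'', hrest⟩

theorem pv_nodup_detected (cards : List String) (s : PySem.Set String) (hs : s.Nodup) :
    (cards.foldl (fun det card =>
        (PySem.Dict.items pvColorIndicators).foldl (fun det ci =>
          if ci.2.any (fun indicator => PySem.Str.isIn (PySem.Str.lower indicator) (PySem.Str.lower card))
          then PySem.Set.add det ci.1 else det) det) s).Nodup := by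
  induction cards generalizing s with
  | nil => exact hs
  | cons card cards ih => exact ih _ (pv_nodup_foldl_add_if _ _ _ hs)

-- the five keys in sorted order
theorem pv_pairwise_keys : (["B", "G", "R", "U", "W"] : List String).Pairwise (· < ·) := by
  simp only [List.pairwise_cons, List.mem_cons, List.not_mem_nil, or_false, List.Pairwise.nil,
    String.lt_iff_toList_lt]
  refine ⟨?_, ?_, ?_, ?_, ?_, trivial⟩ <;> intro y hy <;> rcases hy with rfl | rfl | rfl | rfl | rfl <;> decide

theorem pv_sorted_keys :
    PySem.List.sorted (PySem.Dict.keys pvColorIndicators) (fun x => x) false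
      = ["B", "G", "R", "U", "W"] := by
  apply PySem.List.sorted_eq_of_perm_of_pairwise_lt _ _ (fun x => x) _ pv_pairwise_keys
  rw [show PySem.Dict.keys pvColorIndicators = ["W", "U", "B", "R", "G"] from rfl]
  decide


-- one row of the table: the blob test for a color equals "some card hits the row"
theorem pv_row_iff (cards : List String) (c : String) (inds : List String)
    (hget : PySem.Dict.getD pvColorIndicators c [] = inds)
    (hrow : (c, inds) ∈ PySem.Dict.items pvColorIndicators)
    (hind : ∀ ind ∈ inds, (PySem.Str.lower ind).toList ≠ [] ∧ '\n' ∉ (PySem.Str.lower ind).toList)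
    (huniq : ∀ ci ∈ PySem.Dict.items pvColorIndicators, ci.1 = c → ci.2 = inds) :
    (((PySem.Dict.getD pvColorIndicators c []).any (fun indicator =>
        PySem.Str.isIn (PySem.Str.lower indicator)
          (PySem.Str.join "\n" (cards.map (fun card => PySem.Str.lower card))))) = true)
      ↔ ∃ card ∈ cards, ∃ ci ∈ PySem.Dict.items pvColorIndicators,
          (ci.2.any (fun indicator => PySem.Str.isIn (PySem.Str.lower indicator) (PySem.Str.lower card))) = true
          ∧ c = ci.1 := by
  rw [hget, pv_any_blob cards inds hind]
  constructor
  · rintro ⟨card, hc, h⟩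
    exact ⟨card, hc, (c, inds), hrow, h, rfl⟩
  · rintro ⟨card, hc, ci, hci, h, rfl⟩
    have h2 := huniq ci hci rfl
    rw [h2] at h
    exact ⟨card, hc, h⟩

-- ===== VERDICT (by name: the statement is the Claim_ definition above) =====
theorem detect_colors_from_cards_py_spec : Claim_equal_detect_colors_from_cards_py := by
  intro cards _
  unfold Spec_detect_colors_from_cards_py
  simp only [detect_colors_from_cards_py, detect_colors_from_cards_py_alt]
  rw [pv_sorted_keys]
  refine congrArg (fun l => PySem.Str.join "" l) ?_
  apply PySem.List.sorted_eq_of_perm_of_pairwise_lt _ _ (fun x => x)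
  · rw [List.perm_ext_iff_of_nodup (pv_pairwise_keys.nodup.filter _)
        (pv_nodup_detected cards PySem.Set.empty List.nodup_nil)]
    intro a
    rw [List.mem_filter, pv_mem_detected]
    simp only [PySem.Set.empty, List.not_mem_nil, false_or]
    constructor
    · rintro ⟨ha, hp⟩
      rcases (show a = "B" ∨ a = "G" ∨ a = "R" ∨ a = "U" ∨ a = "W" by simpa using ha)
        with rfl | rfl | rfl | rfl | rfl
      · exact (pv_row_iff cards "B" ["Swamp", "Black", "Dimir", "Rakdos", "Orzhov", "Golgari"]
          rfl (by decide) (by decide) (by decide)).1 hp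
      · exact (pv_row_iff cards "G" ["Forest", "Green", "Gruul", "Golgari", "Simic", "Selesnya"]
          rfl (by decide) (by decide) (by decide)).1 hp
      · exact (pv_row_iff cards "R" ["Mountain", "Red", "Rakdos", "Izzet", "Boros", "Gruul"]
          rfl (by decide) (by decide) (by decide)).1 hp
      · exact (pv_row_iff cards "U" ["Island", "Blue", "Azorius", "Dimir", "Izzet", "Simic"]
          rfl (by decide) (by decide) (by decide)).1 hp
      · exact (pv_row_iff cards "W" ["Plains", "White", "Azorius", "Orzhov", "Boros", "Selesnya"]
          rfl (by decide) (by decide) (by decide)).1 hp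
    · rintro ⟨card, hc, ci, hci, h, rfl⟩
      have hci5 : ci ∈ ([("W", ["Plains", "White", "Azorius", "Orzhov", "Boros", "Selesnya"]),
          ("U", ["Island", "Blue", "Azorius", "Dimir", "Izzet", "Simic"]),
          ("B", ["Swamp", "Black", "Dimir", "Rakdos", "Orzhov", "Golgari"]),
          ("R", ["Mountain", "Red", "Rakdos", "Izzet", "Boros", "Gruul"]),
          ("G", ["Forest", "Green", "Gruul", "Golgari", "Simic", "Selesnya"])] :
            List (String × List String)) := hci
      rcases (show ci = ("W", ["Plains", "White", "Azorius", "Orzhov", "Boros", "Selesnya"]) ∨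
          ci = ("U", ["Island", "Blue", "Azorius", "Dimir", "Izzet", "Simic"]) ∨
          ci = ("B", ["Swamp", "Black", "Dimir", "Rakdos", "Orzhov", "Golgari"]) ∨
          ci = ("R", ["Mountain", "Red", "Rakdos", "Izzet", "Boros", "Gruul"]) ∨
          ci = ("G", ["Forest", "Green", "Gruul", "Golgari", "Simic", "Selesnya"]) by
            simpa using hci5)
        with rfl | rfl | rfl | rfl | rfl
      · exact ⟨by decide, (pv_row_iff cards "W" ["Plains", "White", "Azorius", "Orzhov", "Boros", "Selesnya"]
          rfl (by decide) (by decide) (by decide)).2 ⟨card, hc, _, hci, h, rfl⟩⟩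
      · exact ⟨by decide, (pv_row_iff cards "U" ["Island", "Blue", "Azorius", "Dimir", "Izzet", "Simic"]
          rfl (by decide) (by decide) (by decide)).2 ⟨card, hc, _, hci, h, rfl⟩⟩
      · exact ⟨by decide, (pv_row_iff cards "B" ["Swamp", "Black", "Dimir", "Rakdos", "Orzhov", "Golgari"]
          rfl (by decide) (by decide) (by decide)).2 ⟨card, hc, _, hci, h, rfl⟩⟩
      · exact ⟨by decide, (pv_row_iff cards "R" ["Mountain", "Red", "Rakdos", "Izzet", "Boros", "Gruul"]
          rfl (by decide) (by decide) (by decide)).2 ⟨card, hc, _, hci, h, rfl⟩⟩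
      · exact ⟨by decide, (pv_row_iff cards "G" ["Forest", "Green", "Gruul", "Golgari", "Simic", "Selesnya"]
          rfl (by decide) (by decide) (by decide)).2 ⟨card, hc, _, hci, h, rfl⟩⟩
  · exact pv_pairwise_keys.filter _
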